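-- pv_equiv track=rewrite | github.com/anacds/f1_multi_agent | f1_weather_mcp/src/weather_mcp/logic.py | _bool_will_rain
-- ===== SOURCE A (Python) =====
-- from typing import Any, Dict, List, Optional
--
-- def _bool_will_rain(summary_phrase: Optional[str], summaries: List[Dict[str, Any]]) -> bool:
--
--     if summary_phrase:
--         p = summary_phrase.lower()
--         if "rain" in p or "shower" in p:
--             return True
--
--     for s in summaries:
--         txt = (s.get("MinuteText") or "").lower()
--         if "rain" in txt or "shower" in txt:
--             return True
--     return False
-- ===== SOURCE B (Python) =====
-- from typing import Any, Dict, List, Optional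
--
-- def _bool_will_rain(summary_phrase: Optional[str], summaries: List[Dict[str, Any]]) -> bool:
--     # Build one combined lowercased blob (newline-separated so no match can span
--     # item boundaries) and scan it once per keyword.
--     texts = [summary_phrase or ""] + [(s.get("MinuteText") or "") for s in summaries]
--     blob = "\n".join(texts).lower()
--     return "rain" in blob or "shower" in blob
-- ===== Notes on version B (the rewrite author's own statement) =====
-- stated objective: alternative
-- what changed: Replaces the early-return per-item loop (lowercase each text, two substring tests, return on first hit) with a single newline-joined lowercased blob scanned once per keyword.
import Mathlib
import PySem

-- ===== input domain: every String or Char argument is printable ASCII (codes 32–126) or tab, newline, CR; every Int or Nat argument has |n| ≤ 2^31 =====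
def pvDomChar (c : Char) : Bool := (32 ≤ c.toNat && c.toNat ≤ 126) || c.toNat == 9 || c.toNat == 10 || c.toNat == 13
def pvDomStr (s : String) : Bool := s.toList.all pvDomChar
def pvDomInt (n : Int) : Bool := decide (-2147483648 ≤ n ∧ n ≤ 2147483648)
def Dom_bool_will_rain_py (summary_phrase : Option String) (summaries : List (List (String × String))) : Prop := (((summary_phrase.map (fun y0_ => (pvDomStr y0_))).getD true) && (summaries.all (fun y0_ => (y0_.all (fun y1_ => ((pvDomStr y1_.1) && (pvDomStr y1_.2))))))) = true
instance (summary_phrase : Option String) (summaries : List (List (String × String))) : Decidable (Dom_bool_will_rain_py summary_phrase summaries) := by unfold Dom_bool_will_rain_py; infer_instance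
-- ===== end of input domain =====

-- B replaces A's early-return per-item loop by one newline-joined lowercased blob
-- scanned once per keyword (alternative decomposition, same cost).

-- ===== PORT A =====
-- the 'for s in summaries: …' loop with its early return
def bwrLoopA : List (List (String × String)) → Bool
  | [] => false
  | s :: rest =>
    let txt := PySem.Str.lower (((PySem.Dict.mk s).get? "MinuteText").getD "")
    if PySem.Str.isIn "rain" txt || PySem.Str.isIn "shower" txt then true
    else bwrLoopA rest

def bool_will_rain_py (summary_phrase : Option String) (summaries : List (List (String × String))) : Bool :=
  -- 'if summary_phrase:' — truthy test: not None and not ""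
  let phraseHit : Bool :=
    match summary_phrase with
    | none => false
    | some phrase =>
      if phrase == "" then false
      else
        let p := PySem.Str.lower phrase
        PySem.Str.isIn "rain" p || PySem.Str.isIn "shower" p
  if phraseHit then true else bwrLoopA summaries

-- ===== PORT B =====
def bool_will_rain_py_alt (summary_phrase : Option String) (summaries : List (List (String × String))) : Bool :=
  let texts := (summary_phrase.getD "") :: summaries.map (fun s => ((PySem.Dict.mk s).get? "MinuteText").getD "")
  let blob := PySem.Str.lower (PySem.Str.join "\n" texts)
  PySem.Str.isIn "rain" blob || PySem.Str.isIn "shower" blob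

-- ===== PRECONDITION & SPEC =====
def Spec_bool_will_rain_py (summary_phrase : Option String) (summaries : List (List (String × String))) (out : Bool) : Prop := out = bool_will_rain_py_alt summary_phrase summaries
instance (summary_phrase : Option String) (summaries : List (List (String × String))) (out : Bool) : Decidable (Spec_bool_will_rain_py summary_phrase summaries out) := by unfold Spec_bool_will_rain_py; infer_instance

-- ===== CLAIM (what is proved, stated in full; the proofs are below) =====
def Claim_equal_bool_will_rain_py : Prop := ∀ (summary_phrase : Option String) (summaries : List (List (String × String))), Dom_bool_will_rain_py summary_phrase summaries → Spec_bool_will_rain_py summary_phrase summaries (bool_will_rain_py summary_phrase summaries)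

-- ===== LEMMAS AND PROOFS =====

-- drop past the first block of an append (hand lemma; no Mathlib name closed it)
theorem bwr_drop_append_ge {α : Type} (j : Nat) (x y : List α) (h : x.length ≤ j) :
    (x ++ y).drop j = y.drop (j - x.length) := by
  induction x generalizing j with
  | nil => simp
  | cons a t ih =>
    cases j with
    | zero => simp at h
    | succ j' => simpa using ih j' (by simpa using h)

-- a prefix of x ++ c :: y that avoids c stays inside x
theorem bwr_pref_before_sep {p x y : List Char} {c : Char} (hc : c ∉ p)
    (h : p <+: x ++ c :: y) : p <+: x := by
  induction p generalizing x with
  | nil => exact List.nil_prefix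
  | cons q p' ih =>
    cases x with
    | nil =>
      rcases List.cons_prefix_cons.mp h with ⟨rfl, _⟩
      exact absurd (List.mem_cons_self) hc
    | cons d x' =>
      rcases List.cons_prefix_cons.mp h with ⟨rfl, h'⟩
      exact List.cons_prefix_cons.mpr ⟨rfl, ih (fun hm => hc (List.mem_cons_of_mem _ hm)) h'⟩

-- an infix avoiding the separator lies entirely on one side of it
theorem bwr_infix_sep {p x y : List Char} {c : Char} (hc : c ∉ p) :
    p <:+: x ++ c :: y ↔ p <:+: x ∨ p <:+: y := by
  constructor
  · intro h
    have h1 : PySem.Chars.isIn p (x ++ c :: y) = true := (PySem.Chars.isIn_iff_infix p _).mpr h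
    rcases (PySem.Chars.exists_prefix_drop_iff_isIn p _).mpr h1 with ⟨j, hj⟩
    by_cases hle : j ≤ x.length
    · rw [List.drop_append_of_le_length hle] at hj
      exact Or.inl ((bwr_pref_before_sep hc hj).isInfix.trans (List.drop_suffix j x).isInfix)
    · rw [bwr_drop_append_ge j x (c :: y) (by omega)] at hj
      cases hd : j - x.length with
      | zero => omega
      | succ k =>
        rw [hd, List.drop_succ_cons] at hj
        exact Or.inr (hj.isInfix.trans (List.drop_suffix k y).isInfix)
  · rintro (h | h)
    · exact h.trans ⟨[], c :: y, by simp⟩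
    · exact h.trans ⟨x ++ [c], [], by simp⟩

-- substring of a '\n'-joined list ↔ substring of some part (nonempty pattern without '\n')
theorem bwr_isIn_join {p : List Char} (hne : p ≠ []) (hc : '\n' ∉ p) (parts : List (List Char)) :
    PySem.Chars.isIn p (PySem.Chars.join ['\n'] parts) = true ↔
      ∃ t ∈ parts, PySem.Chars.isIn p t = true := by
  induction parts with
  | nil =>
    have hj : PySem.Chars.join ['\n'] ([] : List (List Char)) = [] := by
      simp [PySem.Chars.join, List.intercalate]
    rw [hj, PySem.Chars.isIn_iff_infix]
    simp [List.infix_nil, hne]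
  | cons a rest ih =>
    cases rest with
    | nil =>
      simp [PySem.Chars.join, List.intercalate, List.intersperse]
    | cons b r =>
      have hjoin : PySem.Chars.join ['\n'] (a :: b :: r)
          = a ++ '\n' :: PySem.Chars.join ['\n'] (b :: r) := by
        simp [PySem.Chars.join, List.intercalate, List.intersperse]
      rw [hjoin, PySem.Chars.isIn_iff_infix, bwr_infix_sep hc, ← PySem.Chars.isIn_iff_infix,
        ← PySem.Chars.isIn_iff_infix, ih]
      constructor
      · rintro (h | ⟨t, ht, hp⟩)
        · exact ⟨a, by simp, h⟩
        · exact ⟨t, by simp [ht], hp⟩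
      · rintro ⟨t, ht, hp⟩
        rcases List.mem_cons.mp ht with rfl | ht'
        · exact Or.inl hp
        · exact Or.inr ⟨t, ht', hp⟩

-- lower commutes with a '\n'-join ('\n' lowers to itself)
theorem bwr_lower_join (parts : List (List Char)) :
    PySem.Chars.lower (PySem.Chars.join ['\n'] parts)
      = PySem.Chars.join ['\n'] (parts.map PySem.Chars.lower) := by
  have hmap : ∀ l : List (List Char),
      (List.intercalate ['\n'] l).map PySem.Chars.lowerChar
        = List.intercalate ['\n'] (l.map (List.map PySem.Chars.lowerChar)) := by
    intro l
    induction l with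
    | nil => simp [List.intercalate]
    | cons a t iht =>
      cases t with
      | nil => simp [List.intercalate]
      | cons b r =>
        have hnl : PySem.Chars.lowerChar '\n' = '\n' := by decide
        simp only [List.intercalate, List.intersperse, List.map_cons, List.flatten] at iht ⊢
        simp_all
  simpa [PySem.Chars.lower, PySem.Chars.join] using hmap parts

-- the per-text keyword test both programs reduce to
def bwrHit (t : String) : Bool :=
  PySem.Str.isIn "rain" (PySem.Str.lower t) || PySem.Str.isIn "shower" (PySem.Str.lower t)

theorem bwr_loopA_eq (summaries : List (List (String × String))) :
    bwrLoopA summaries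
      = (summaries.map (fun s => ((PySem.Dict.mk s).get? "MinuteText").getD "")).any bwrHit := by
  induction summaries with
  | nil => rfl
  | cons s rest ih =>
    show (if bwrHit (((PySem.Dict.mk s).get? "MinuteText").getD "") = true then true
          else bwrLoopA rest) = _
    rw [List.map_cons, List.any_cons, ih]
    cases bwrHit (((PySem.Dict.mk s).get? "MinuteText").getD "") <;> simp

-- Str-level form of the two facts above, specialised to this blob
theorem bwr_isIn_blob (p : String) (hne : p.toList ≠ []) (hc : '\n' ∉ p.toList)
    (texts : List String) :
    PySem.Str.isIn p (PySem.Str.lower (PySem.Str.join "\n" texts)) = true ↔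
      ∃ t ∈ texts, PySem.Str.isIn p (PySem.Str.lower t) = true := by
  have hjoin : (PySem.Str.join "\n" texts).toList
      = PySem.Chars.join ['\n'] (texts.map String.toList) := by
    simp [PySem.Str.join]
  have hblob : (PySem.Str.lower (PySem.Str.join "\n" texts)).toList
      = PySem.Chars.join ['\n'] (texts.map (fun t => PySem.Chars.lower t.toList)) := by
    simp only [PySem.Str.toList_lower, hjoin, bwr_lower_join, List.map_map]
    rfl
  rw [show PySem.Str.isIn p (PySem.Str.lower (PySem.Str.join "\n" texts))
        = PySem.Chars.isIn p.toList (PySem.Str.lower (PySem.Str.join "\n" texts)).toList from by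
      simp [PySem.Str.isIn]]
  rw [hblob, bwr_isIn_join hne hc]
  constructor
  · rintro ⟨l, hl, h⟩
    rcases List.mem_map.mp hl with ⟨t, ht, rfl⟩
    exact ⟨t, ht, by simpa [PySem.Str.isIn, PySem.Str.toList_lower] using h⟩
  · rintro ⟨t, ht, h⟩
    exact ⟨PySem.Chars.lower t.toList, List.mem_map.mpr ⟨t, ht, rfl⟩,
      by simpa [PySem.Str.isIn, PySem.Str.toList_lower] using h⟩

theorem bwr_alt_eq_any (summary_phrase : Option String) (summaries : List (List (String × String))) :
    bool_will_rain_py_alt summary_phrase summaries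
      = ((summary_phrase.getD "") ::
          summaries.map (fun s => ((PySem.Dict.mk s).get? "MinuteText").getD "")).any bwrHit := by
  unfold bool_will_rain_py_alt
  set texts := (summary_phrase.getD "") ::
    summaries.map (fun s => ((PySem.Dict.mk s).get? "MinuteText").getD "") with htexts
  have hr := bwr_isIn_blob "rain" (by decide) (by decide) texts
  have hs := bwr_isIn_blob "shower" (by decide) (by decide) texts
  rw [Bool.eq_iff_iff]
  simp only [Bool.or_eq_true, List.any_eq_true, hr, hs]
  constructor
  · rintro (⟨t, ht, h⟩ | ⟨t, ht, h⟩)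
    · exact ⟨t, ht, by unfold bwrHit; rw [Bool.or_eq_true]; exact Or.inl h⟩
    · exact ⟨t, ht, by unfold bwrHit; rw [Bool.or_eq_true]; exact Or.inr h⟩
  · rintro ⟨t, ht, h⟩
    unfold bwrHit at h; rw [Bool.or_eq_true] at h
    rcases h with h | h
    · exact Or.inl ⟨t, ht, h⟩
    · exact Or.inr ⟨t, ht, h⟩

theorem bwr_hit_empty : bwrHit "" = false := by decide

-- ===== VERDICT (by name: the statement is the Claim_ definition above) =====
theorem bool_will_rain_py_spec : Claim_equal_bool_will_rain_py := by
  intro summary_phrase summaries _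
  unfold Spec_bool_will_rain_py
  rw [bwr_alt_eq_any, List.any_cons, ← bwr_loopA_eq]
  unfold bool_will_rain_py
  match summary_phrase with
  | none =>
    simp [Option.getD, bwr_hit_empty]
  | some phrase =>
    by_cases h : phrase = ""
    · subst h; simp [bwr_hit_empty]
    · show (if (if (phrase == "") = true then false else bwrHit phrase) = true then true
            else bwrLoopA summaries) = (bwrHit phrase || bwrLoopA summaries)
      rw [if_neg (by simpa using h : ¬ (phrase == "") = true)]
      cases bwrHit phrase <;> simp
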